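-- pv_equiv track=rewrite | github.com/spacetelescope/calcos | calcos/extract.py | excludeAllBad
-- ===== SOURCE A (Python) =====
-- def excludeAllBad(good_i, i, j):
--     """Exclude endpoints of BK_i where all pixels are flagged as bad.
--
--     Parameters
--     ----------
--     good_i: array_like
--         1-D array of floats, one for each element along the dispersion
--         axis.  The values are 0. or 1., depending on the data quality array
--         in the background regions.  If any element in the DQ array in
--         column i (in either background region) indicates a bad pixel,
--         good_i[i] will be 0 (bad); otherwise, it will be 1 (good).
--
--     i: int
--         Lower limit of a slice, i:j excludes the X_OFFSET (as shifted
--         depending on the wavecal offset).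
--
--     j: int
--         Upper limit of a slice.
--
--     Returns
--     -------
--     tuple of two integers
--         New values for i and j, such that good_i[i] and good_i[j-1]
--         are both > 0 (if there are any such indices)
--     """
--
--     nelem = len(good_i)
--
--     done = False
--     ip = i
--     while not done:
--         if ip >= nelem:
--             break
--         if good_i[ip] > 0.:
--             done = True
--             break
--         ip += 1
--     if not done:        # no point not flagged as bad
--         ip = i
--
--     done = False
--     # i:j is a slice, so start looking for good data at j-1
--     jp = j - 1
--     while not done:
--         if jp < ip:
--             break
--         if good_i[jp] > 0.:
--             done = True
--             break
--         jp -= 1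
--     if not done:
--         jp = j
--     jp += 1             # jp is the upper limit of a slice
--
--     return (ip, jp)
-- ===== SOURCE B (Python) =====
-- def excludeAllBad(good_i, i, j):
--     """Trim slice endpoints i:j that are flagged bad.
--
--     Builds the sorted table of good indices once, then locates the new
--     endpoints with two binary searches instead of two linear scans.
--     """
--     good = [k for k, g in enumerate(good_i) if g > 0.]
--
--     # first good index >= i (bisect_left written out)
--     lo, hi = 0, len(good)
--     while lo < hi:
--         m = (lo + hi) // 2
--         if good[m] < i:
--             lo = m + 1
--         else:
--             hi = m
--     ip = good[lo] if lo < len(good) else i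
--
--     # last good index < j (searching only at positions >= lo, i.e. indices >= ip)
--     lo2, hi2 = lo, len(good)
--     while lo2 < hi2:
--         m = (lo2 + hi2) // 2
--         if good[m] < j:
--             lo2 = m + 1
--         else:
--             hi2 = m
--     jp = good[lo2 - 1] + 1 if lo2 > lo else j + 1
--
--     return (ip, jp)
-- ===== Notes on version B (the rewrite author's own statement) =====
-- stated objective: alternative
-- what changed: Replaces A's two sentinel-controlled linear while-scans over the pixel array with one pass that builds the sorted table of good indices and two hand-written bisect_left binary searches on that table for the new endpoints.
-- outside the precondition, e.g. on excludeAllBad([0, 1], -1, 2): A returns (-1, 2), B returns (1, 2)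
import Mathlib
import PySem

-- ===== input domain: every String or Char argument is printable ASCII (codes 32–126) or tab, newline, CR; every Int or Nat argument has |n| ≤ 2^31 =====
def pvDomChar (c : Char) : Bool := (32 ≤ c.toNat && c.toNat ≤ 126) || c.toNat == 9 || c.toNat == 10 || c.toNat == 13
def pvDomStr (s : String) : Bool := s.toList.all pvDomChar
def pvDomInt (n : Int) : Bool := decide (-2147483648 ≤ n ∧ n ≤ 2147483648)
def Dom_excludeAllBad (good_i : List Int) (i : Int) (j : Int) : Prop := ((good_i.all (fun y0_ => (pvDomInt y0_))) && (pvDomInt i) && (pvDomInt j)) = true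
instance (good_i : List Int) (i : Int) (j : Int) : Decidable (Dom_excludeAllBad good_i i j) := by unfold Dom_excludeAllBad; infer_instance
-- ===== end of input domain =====

-- B replaces A's two linear while-scans with a sorted table of good indices plus two binary searches (alternative decomposition, not claimed faster).

-- ===== PORT A =====
-- forward while-loop of A: returns some ip at the first good pixel, none if the scan runs off the end ("not done")
def fwdLoop (g : List Int) (nelem : Int) (ip : Int) : Option Int :=
  if _h : nelem ≤ ip then none
  else if 0 < (PySem.List.pyGet? g ip).getD 0 then some ip
  else fwdLoop g nelem (ip + 1)
termination_by (nelem - ip).toNat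
decreasing_by omega

-- backward while-loop of A: first good pixel scanning down from jp, stopping below ipv
def bwdLoop (g : List Int) (ipv : Int) (jp : Int) : Option Int :=
  if _h : jp < ipv then none
  else if 0 < (PySem.List.pyGet? g jp).getD 0 then some jp
  else bwdLoop g ipv (jp - 1)
termination_by (jp - ipv + 1).toNat
decreasing_by omega

def excludeAllBad (good_i : List Int) (i : Int) (j : Int) : Int × Int :=
  let nelem : Int := good_i.length
  let ip := (fwdLoop good_i nelem i).getD i
  let jp := (bwdLoop good_i ip (j - 1)).getD j
  (ip, jp + 1)

-- ===== PORT B =====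
-- [k for k, g in enumerate(good_i) if g > 0.]
def goodList (g : List Int) : List Int :=
  (PySem.List.enumerate g 0).filterMap (fun p => if 0 < p.2 then some p.1 else none)

-- hand-written bisect_left loop of Source B (the midpoint m is inlined)
def bisectLoop (good : List Int) (t : Int) (lo hi : Nat) : Nat :=
  if _h : lo < hi then
    if good.getD ((lo + hi) / 2) 0 < t then bisectLoop good t ((lo + hi) / 2 + 1) hi
    else bisectLoop good t lo ((lo + hi) / 2)
  else lo
termination_by hi - lo
decreasing_by all_goals omega

def excludeAllBad_alt (good_i : List Int) (i : Int) (j : Int) : Int × Int :=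
  let good := goodList good_i
  let lo := bisectLoop good i 0 good.length
  let ip := if lo < good.length then good.getD lo 0 else i
  let lo2 := bisectLoop good j lo good.length
  let jp := if lo < lo2 then good.getD (lo2 - 1) 0 + 1 else j + 1
  (ip, jp)

-- ===== PRECONDITION & SPEC =====
-- Pre_ excludes negative lower limits i (where A silently uses Python's negative-index
-- wraparound, a quirk B does not reproduce) and upper limits j past the end of the array
-- whose backward scan actually starts (j > len and i < j), where A raises IndexError.
def Pre_excludeAllBad (good_i : List Int) (i : Int) (j : Int) : Prop :=
  0 ≤ i ∧ (j ≤ (good_i.length : Int) ∨ j ≤ i)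
instance (good_i : List Int) (i : Int) (j : Int) : Decidable (Pre_excludeAllBad good_i i j) := by unfold Pre_excludeAllBad; infer_instance

def pvWitness_excludeAllBad : List Int × Int × Int := ([0, 1, 1, 0], 0, 4)

def Spec_excludeAllBad (good_i : List Int) (i : Int) (j : Int) (out : Int × Int) : Prop := out = excludeAllBad_alt good_i i j
instance (good_i : List Int) (i : Int) (j : Int) (out : Int × Int) : Decidable (Spec_excludeAllBad good_i i j out) := by unfold Spec_excludeAllBad; infer_instance

-- ===== CLAIM (what is proved, stated in full; the proofs are below) =====
def Claim_equal_excludeAllBad : Prop := ∀ (good_i : List Int) (i : Int) (j : Int), Dom_excludeAllBad good_i i j → Pre_excludeAllBad good_i i j → Spec_excludeAllBad good_i i j (excludeAllBad good_i i j)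

-- ===== LEMMAS AND PROOFS =====

-- value of good_i[k] as the ports read it
def gv (g : List Int) (k : Int) : Int := (PySem.List.pyGet? g k).getD 0

theorem gv_natCast (g : List Int) (q : Nat) (hq : q < g.length) : gv g (q : Int) = g[q] := by
  simp [gv, hq]

theorem mem_goodList (g : List Int) (x : Int) :
    x ∈ goodList g ↔ 0 ≤ x ∧ x < (g.length : Int) ∧ 0 < gv g x := by
  constructor
  · intro hx
    simp only [goodList, List.mem_filterMap] at hx
    obtain ⟨p, hp, hpx⟩ := hx
    rw [PySem.List.mem_enumerate_iff] at hp
    obtain ⟨q, hq, rfl⟩ := hp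
    by_cases h : 0 < g[q]
    · simp [h] at hpx
      subst hpx
      refine ⟨by positivity, by exact_mod_cast hq, ?_⟩
      rw [gv_natCast g q hq]; exact h
    · simp [h] at hpx
  · rintro ⟨h0, hn, hg⟩
    simp only [goodList, List.mem_filterMap]
    have hq : x.toNat < g.length := by omega
    refine ⟨(x, g[x.toNat]), ?_, ?_⟩
    · rw [PySem.List.mem_enumerate_iff]
      exact ⟨x.toNat, hq, by simp; omega⟩
    · have hxx : x = (x.toNat : Int) := by omega
      have hv : gv g x = g[x.toNat] := by
        conv_lhs => rw [hxx]
        exact gv_natCast g x.toNat hq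
      simp [← hv, hg]

theorem pairwise_goodList (g : List Int) : (goodList g).Pairwise (· < ·) := by
  have h := PySem.List.pairwise_lt_enumerate g (0 : Int)
  exact List.Pairwise.filterMap _ (by
    rintro p q hpq a ha b hb
    by_cases hp : 0 < p.2
    · simp [hp] at ha
      by_cases hq : 0 < q.2
      · simp [hq] at hb
        rw [← ha, ← hb]; exact hpq
      · simp [hq] at hb
    · simp [hp] at ha) h

theorem goodList_mono (g : List Int) {q q' : Nat} (h : q ≤ q') (h' : q' < (goodList g).length) :
    (goodList g)[q]'(by omega) ≤ (goodList g)[q'] := by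
  rcases Nat.lt_or_ge q q' with hlt | hge
  · exact le_of_lt ((List.pairwise_iff_getElem.mp (pairwise_goodList g)) q q' (by omega) h' hlt)
  · have : q = q' := by omega
    subst this; exact le_refl _

theorem bisect_spec (good : List Int) (t : Int) (hpw : good.Pairwise (· < ·)) :
    ∀ (lo hi : Nat), lo ≤ hi → hi ≤ good.length →
      lo ≤ bisectLoop good t lo hi ∧ bisectLoop good t lo hi ≤ hi ∧
      (∀ m, lo ≤ m → m < bisectLoop good t lo hi → good.getD m 0 < t) ∧
      (∀ m, bisectLoop good t lo hi ≤ m → m < hi → t ≤ good.getD m 0) := by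
  have key : ∀ (d lo hi : Nat), hi - lo = d → lo ≤ hi → hi ≤ good.length →
      lo ≤ bisectLoop good t lo hi ∧ bisectLoop good t lo hi ≤ hi ∧
      (∀ m, lo ≤ m → m < bisectLoop good t lo hi → good.getD m 0 < t) ∧
      (∀ m, bisectLoop good t lo hi ≤ m → m < hi → t ≤ good.getD m 0) := by
    intro d
    induction d using Nat.strong_induction_on with
    | _ d IH =>
      intro lo hi hd hlh hhl
      by_cases hlt : lo < hi
      · have hm1 : lo ≤ (lo + hi) / 2 := by omega
        have hm2 : (lo + hi) / 2 < hi := by omega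
        have hmlen : (lo + hi) / 2 < good.length := by omega
        have hmono : ∀ (a b : Nat), a ≤ b → b < good.length →
            good.getD a 0 ≤ good.getD b 0 := by
          intro a b hab hbl
          rw [List.getD_eq_getElem good 0 (by omega), List.getD_eq_getElem good 0 hbl]
          rcases Nat.lt_or_ge a b with h | h
          · exact le_of_lt ((List.pairwise_iff_getElem.mp hpw) a b (by omega) hbl h)
          · have : a = b := by omega
            subst this; exact le_refl _
        by_cases hcmp : good.getD ((lo + hi) / 2) 0 < t
        · have heq : bisectLoop good t lo hi = bisectLoop good t ((lo + hi) / 2 + 1) hi := by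
            rw [bisectLoop, dif_pos hlt, if_pos hcmp]
          obtain ⟨ih1, ih2, ih3, ih4⟩ :=
            IH (hi - ((lo + hi) / 2 + 1)) (by omega) ((lo + hi) / 2 + 1) hi rfl (by omega) hhl
          rw [heq]
          refine ⟨by omega, ih2, ?_, ih4⟩
          intro m hm1' hm2'
          rcases Nat.lt_or_ge m ((lo + hi) / 2 + 1) with h | h
          · exact lt_of_le_of_lt (hmono m ((lo + hi) / 2) (by omega) hmlen) hcmp
          · exact ih3 m h hm2'
        · have heq : bisectLoop good t lo hi = bisectLoop good t lo ((lo + hi) / 2) := by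
            rw [bisectLoop, dif_pos hlt, if_neg hcmp]
          obtain ⟨ih1, ih2, ih3, ih4⟩ :=
            IH ((lo + hi) / 2 - lo) (by omega) lo ((lo + hi) / 2) rfl (by omega) (by omega)
          rw [heq]
          refine ⟨ih1, by omega, ih3, ?_⟩
          intro m hm1' hm2'
          rcases Nat.lt_or_ge m ((lo + hi) / 2) with h | h
          · exact ih4 m hm1' h
          · exact le_trans (not_lt.mp hcmp) (hmono ((lo + hi) / 2) m h (by omega))
      · have heq : bisectLoop good t lo hi = lo := by
          rw [bisectLoop, dif_neg hlt]
        rw [heq]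
        exact ⟨le_refl _, hlh, by omega, by omega⟩
  intro lo hi h1 h2
  exact key (hi - lo) lo hi rfl h1 h2

theorem fwd_some (g : List Int) (nelem ip k : Int) (h : fwdLoop g nelem ip = some k) :
    ip ≤ k ∧ k < nelem ∧ 0 < gv g k ∧ ∀ m, ip ≤ m → m < k → ¬ 0 < gv g m := by
  fun_induction fwdLoop g nelem ip with
  | case1 => simp at h
  | case2 ip hend hgood =>
    simp at h; subst h
    exact ⟨le_refl _, by omega, hgood, by omega⟩
  | case3 ip hend hgood IH =>
    obtain ⟨ih1, ih2, ih3, ih4⟩ := IH h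
    refine ⟨by omega, ih2, ih3, ?_⟩
    intro m hm1 hm2
    rcases Int.lt_or_le m (ip + 1) with h' | h'
    · have : m = ip := by omega
      subst this; exact hgood
    · exact ih4 m h' hm2

theorem fwd_none (g : List Int) (nelem ip : Int) (h : fwdLoop g nelem ip = none) :
    ∀ m, ip ≤ m → m < nelem → ¬ 0 < gv g m := by
  fun_induction fwdLoop g nelem ip with
  | case1 ip hend => intro m h1 h2; omega
  | case2 ip hend hgood => simp at h
  | case3 ip hend hgood IH =>
    intro m hm1 hm2
    rcases Int.lt_or_le m (ip + 1) with h' | h'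
    · have : m = ip := by omega
      subst this; exact hgood
    · exact IH h m h' hm2

theorem bwd_some (g : List Int) (ipv jp k : Int) (h : bwdLoop g ipv jp = some k) :
    ipv ≤ k ∧ k ≤ jp ∧ 0 < gv g k ∧ ∀ m, k < m → m ≤ jp → ¬ 0 < gv g m := by
  fun_induction bwdLoop g ipv jp with
  | case1 => simp at h
  | case2 jp hend hgood =>
    simp at h; subst h
    exact ⟨by omega, le_refl _, hgood, by omega⟩
  | case3 jp hend hgood IH =>
    obtain ⟨ih1, ih2, ih3, ih4⟩ := IH h
    refine ⟨ih1, by omega, ih3, ?_⟩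
    intro m hm1 hm2
    rcases Int.lt_or_le (jp - 1) m with h' | h'
    · have : m = jp := by omega
      subst this; exact hgood
    · exact ih4 m hm1 h'

theorem bwd_none (g : List Int) (ipv jp : Int) (h : bwdLoop g ipv jp = none) :
    ∀ m, ipv ≤ m → m ≤ jp → ¬ 0 < gv g m := by
  fun_induction bwdLoop g ipv jp with
  | case1 jp hend => intro m h1 h2; omega
  | case2 jp hend hgood => simp at h
  | case3 jp hend hgood IH =>
    intro m hm1 hm2
    rcases Int.lt_or_le (jp - 1) m with h' | h'
    · have : m = jp := by omega
      subst this; exact hgood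
    · exact IH h m hm1 h'

theorem goodList_getElem_facts (g : List Int) (q : Nat) (hq : q < (goodList g).length) :
    0 ≤ (goodList g)[q] ∧ (goodList g)[q] < (g.length : Int) ∧ 0 < gv g ((goodList g)[q]) :=
  (mem_goodList g _).mp (List.getElem_mem hq)

theorem goodList_index_of_mem (g : List Int) (x : Int)
    (hx : 0 ≤ x) (hxn : x < (g.length : Int)) (hxg : 0 < gv g x) :
    ∃ q : Nat, ∃ hq : q < (goodList g).length, (goodList g)[q] = x :=
  List.mem_iff_getElem.mp ((mem_goodList g x).mpr ⟨hx, hxn, hxg⟩)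

theorem main_equiv (g : List Int) (i j : Int) (hpre : Pre_excludeAllBad g i j) :
    excludeAllBad g i j = excludeAllBad_alt g i j := by
  obtain ⟨hi0, hjpre⟩ := hpre
  have hpw := pairwise_goodList g
  obtain ⟨hb1lo, hb1hi, hb1lt, hb1ge⟩ :=
    bisect_spec (goodList g) i hpw 0 (goodList g).length (Nat.zero_le _) le_rfl
  set r1 := bisectLoop (goodList g) i 0 (goodList g).length with hr1def
  obtain ⟨hb2lo, hb2hi, hb2lt, hb2ge⟩ :=
    bisect_spec (goodList g) j hpw r1 (goodList g).length hb1hi le_rfl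
  set r2 := bisectLoop (goodList g) j r1 (goodList g).length with hr2def
  have hgetD : ∀ (q : Nat) (hq : q < (goodList g).length),
      (goodList g).getD q 0 = (goodList g)[q]'hq := by
    intro q hq; exact List.getD_eq_getElem (goodList g) 0 hq
  -- the lower endpoint
  have hip : (fwdLoop g (g.length : Int) i).getD i =
      (if r1 < (goodList g).length then (goodList g).getD r1 0 else i) := by
    by_cases hr1 : r1 < (goodList g).length
    · simp only [if_pos hr1]
      rw [hgetD r1 hr1]
      obtain ⟨hx0, hxn, hxg⟩ := goodList_getElem_facts g r1 hr1
      have hxi : i ≤ (goodList g)[r1] := by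
        have := hb1ge r1 le_rfl hr1
        rwa [hgetD r1 hr1] at this
      cases hfw : fwdLoop g (g.length : Int) i with
      | none =>
        exact absurd hxg (fwd_none g (g.length : Int) i hfw _ hxi hxn)
      | some k =>
        obtain ⟨hik, hkn, hkg, hkmin⟩ := fwd_some g (g.length : Int) i k hfw
        obtain ⟨q, hq, hqk⟩ := goodList_index_of_mem g k (by omega) hkn hkg
        have hqr1 : r1 ≤ q := by
          by_contra hqlt
          have := hb1lt q (Nat.zero_le _) (by omega)
          rw [hgetD q (by omega)] at this
          omega
        have hxk : (goodList g)[r1] ≤ k := by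
          have := goodList_mono g hqr1 hq
          omega
        have hkx : k ≤ (goodList g)[r1] := by
          by_contra hlt
          exact (hkmin _ hxi (by omega)) hxg
        simp; omega
    · simp only [if_neg hr1]
      have hr1len : r1 = (goodList g).length := by omega
      cases hfw : fwdLoop g (g.length : Int) i with
      | none => simp
      | some k =>
        obtain ⟨hik, hkn, hkg, _⟩ := fwd_some g (g.length : Int) i k hfw
        obtain ⟨q, hq, hqk⟩ := goodList_index_of_mem g k (by omega) hkn hkg
        have := hb1lt q (Nat.zero_le _) (by omega)
        rw [hgetD q hq] at this
        omega
  set ipv := (fwdLoop g (g.length : Int) i).getD i with hipv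
  have hiip : i ≤ ipv := by
    rw [hip]
    by_cases hr1 : r1 < (goodList g).length
    · simp only [if_pos hr1]
      have := hb1ge r1 le_rfl hr1
      omega
    · simp [hr1]
  -- the upper endpoint
  have hjp : (bwdLoop g ipv (j - 1)).getD j =
      (if r1 < r2 then (goodList g).getD (r2 - 1) 0 else j) := by
    by_cases hr12 : r1 < r2
    · simp only [if_pos hr12]
      have hr2len : r2 - 1 < (goodList g).length := by omega
      have hr1len : r1 < (goodList g).length := by omega
      rw [hgetD (r2 - 1) hr2len]
      obtain ⟨hy0, hyn, hyg⟩ := goodList_getElem_facts g (r2 - 1) hr2len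
      have hyj : (goodList g)[r2 - 1] < j := by
        have := hb2lt (r2 - 1) (by omega) (by omega)
        rwa [hgetD (r2 - 1) hr2len] at this
      have hipy : ipv ≤ (goodList g)[r2 - 1] := by
        have h1 : ipv = (goodList g)[r1]'hr1len := by
          rw [hip, if_pos hr1len, hgetD r1 hr1len]
        have := goodList_mono g (show r1 ≤ r2 - 1 by omega) hr2len
        omega
      have hjn : j ≤ (g.length : Int) := by
        rcases hjpre with h | h
        · exact h
        · exfalso
          have h1 := hb2lt r1 le_rfl hr12
          rw [hgetD r1 hr1len] at h1
          have h2 := hb1ge r1 le_rfl hr1len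
          rw [hgetD r1 hr1len] at h2
          omega
      cases hbw : bwdLoop g ipv (j - 1) with
      | none =>
        exact absurd hyg (bwd_none g ipv (j - 1) hbw _ hipy (by omega))
      | some k =>
        obtain ⟨hipk, hkj, hkg, hkmax⟩ := bwd_some g ipv (j - 1) k hbw
        obtain ⟨q, hq, hqk⟩ := goodList_index_of_mem g k (by omega) (by omega) hkg
        have hqr1 : r1 ≤ q := by
          by_contra hqlt
          have h1 := hb1lt q (Nat.zero_le _) (by omega)
          rw [hgetD q (by omega)] at h1
          have h2 : ipv = (goodList g)[r1]'hr1len := by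
            rw [hip, if_pos hr1len, hgetD r1 hr1len]
          have h3 := hb1ge r1 le_rfl hr1len
          rw [hgetD r1 hr1len] at h3
          omega
        have hqr2 : q < r2 := by
          by_contra hge
          have := hb2ge q (by omega) hq
          rw [hgetD q hq] at this
          omega
        have h1 : k ≤ (goodList g)[r2 - 1] := by
          have := goodList_mono g (show q ≤ r2 - 1 by omega) hr2len
          omega
        have h2 : (goodList g)[r2 - 1] ≤ k := by
          by_contra hlt
          exact (hkmax _ (by omega) (by omega)) hyg
        simp; omega
    · simp only [if_neg hr12]
      have hr2r1 : r2 = r1 := by omega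
      cases hbw : bwdLoop g ipv (j - 1) with
      | none => simp
      | some k =>
        exfalso
        obtain ⟨hipk, hkj, hkg, _⟩ := bwd_some g ipv (j - 1) k hbw
        have hjn : j ≤ (g.length : Int) := by
          rcases hjpre with h | h
          · exact h
          · omega
        obtain ⟨q, hq, hqk⟩ := goodList_index_of_mem g k (by omega) (by omega) hkg
        have hqr1 : r1 ≤ q := by
          by_contra hqlt
          have h1 := hb1lt q (Nat.zero_le _) (by omega)
          rw [hgetD q (by omega)] at h1
          have hipi : i ≤ ipv := hiip
          by_cases hr1 : r1 < (goodList g).length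
          · have h2 : ipv = (goodList g)[r1]'hr1 := by
              rw [hip, if_pos hr1, hgetD r1 hr1]
            have h3 : (goodList g)[q]'(by omega) ≤ (goodList g)[r1]'hr1 := by
              have := goodList_mono g (show q ≤ r1 by omega) hr1
              omega
            omega
          · omega
        have := hb2ge q (by omega) hq
        rw [hgetD q hq] at this
        omega
  have hA : excludeAllBad g i j =
      ((fwdLoop g (g.length : Int) i).getD i,
       (bwdLoop g ((fwdLoop g (g.length : Int) i).getD i) (j - 1)).getD j + 1) := rfl
  have hB : excludeAllBad_alt g i j =
      (if bisectLoop (goodList g) i 0 (goodList g).length < (goodList g).length then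
         (goodList g).getD (bisectLoop (goodList g) i 0 (goodList g).length) 0 else i,
       if bisectLoop (goodList g) i 0 (goodList g).length <
          bisectLoop (goodList g) j (bisectLoop (goodList g) i 0 (goodList g).length)
            (goodList g).length then
         (goodList g).getD
           (bisectLoop (goodList g) j (bisectLoop (goodList g) i 0 (goodList g).length)
              (goodList g).length - 1) 0 + 1
       else j + 1) := rfl
  rw [hA, hB, ← hr1def, ← hr2def, ← hipv, hjp, hip]
  by_cases hr12 : r1 < r2 <;> simp [hr12]

-- ===== VERDICT (by name: the statement is the Claim_ definition above) =====
theorem excludeAllBad_spec : Claim_equal_excludeAllBad := by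
  intro good_i i j _hdom hpre
  unfold Spec_excludeAllBad
  exact (main_equiv good_i i j hpre)
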